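-- pv_equiv track=rewrite | github.com/vlas47/fullbox | fullbox/orders/views.py | _format_payload_list
-- ===== SOURCE A (Python) =====
-- def _format_payload_list(value):
--     if value is None or value == "":
--         return "-"
--     if isinstance(value, (list, tuple, set)):
--         items = [str(item).strip() for item in value if str(item).strip()]
--         return ", ".join(items) if items else "-"
--     text = str(value).strip()
--     return text or "-"
-- ===== SOURCE B (Python) =====
-- def _format_payload_list(value):
--     if value is None or value == "":
--         return "-"
--     items = list(value) if isinstance(value, (list, tuple, set)) else [value]
--     # build the result string back-to-front: walk the items in reverse, gluing each
--     # kept (stripped, nonempty) item onto the front of the tail built so far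
--     tail = ""
--     for item in reversed(items):
--         s = str(item).strip()
--         if s:
--             tail = s if not tail else s + ", " + tail
--     return tail or "-"
-- ===== Notes on version B (the rewrite author's own statement) =====
-- stated objective: alternative
-- what changed: Replaces A's staged filter-comprehension followed by ', '.join (with its conditional '-' fallback on the filtered list) by a reverse traversal that builds the result string directly back-to-front, gluing each kept item onto the front of the tail built so far, with no intermediate filtered list and no join call; the scalar case is folded into the same path by wrapping it in a one-element list.
import Mathlib
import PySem

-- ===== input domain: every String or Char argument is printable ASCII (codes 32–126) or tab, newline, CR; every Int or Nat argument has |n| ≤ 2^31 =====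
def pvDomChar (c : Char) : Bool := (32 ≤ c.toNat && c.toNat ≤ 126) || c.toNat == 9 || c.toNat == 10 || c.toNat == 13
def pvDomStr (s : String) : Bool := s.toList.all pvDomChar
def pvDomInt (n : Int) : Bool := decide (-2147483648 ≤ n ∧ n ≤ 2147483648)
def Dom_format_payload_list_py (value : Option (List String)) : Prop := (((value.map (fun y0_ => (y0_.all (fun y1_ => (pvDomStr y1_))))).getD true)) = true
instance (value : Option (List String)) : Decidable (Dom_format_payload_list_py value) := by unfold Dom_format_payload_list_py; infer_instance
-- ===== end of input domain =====

-- B replaces A's filter-comprehension + ", ".join by a direct structural recursion that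
-- builds the joined string back-to-front by concatenation (alternative decomposition, same cost).


-- ===== PORT A =====
-- 'value is None' → none; for a list, 'value == ""' is False, so the None/"" guard is just the none case;
-- the isinstance branch is the some case (items are already str, so str(item) = item); the scalar branch is unreachable.
def format_payload_list_py (value : Option (List String)) : String :=
  match value with
  | none => "-"
  | some xs =>
    let items := (xs.map (fun item => PySem.Str.strip item)).filter (fun s => s != "")
    if items.isEmpty then "-" else PySem.Str.join ", " items

-- ===== PORT B =====
-- one step of Source B's reverse loop: s = str(item).strip(); if s: tail = s if not tail else s + ", " + tail
def fpl_step (tail : String) (item : String) : String :=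
  let s := PySem.Str.strip item
  if s == "" then tail
  else if tail == "" then s
  else s ++ ", " ++ tail

-- 'for item in reversed(items)' with accumulator tail, then 'tail or "-"'
def format_payload_list_py_alt (value : Option (List String)) : String :=
  match value with
  | none => "-"
  | some items =>
    let tail := items.reverse.foldl fpl_step ""
    if tail == "" then "-" else tail

-- ===== PRECONDITION & SPEC =====
def Spec_format_payload_list_py (value : Option (List String)) (out : String) : Prop := out = format_payload_list_py_alt value
instance (value : Option (List String)) (out : String) : Decidable (Spec_format_payload_list_py value out) := by unfold Spec_format_payload_list_py; infer_instance

-- ===== CLAIM =====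
def Claim_equal_format_payload_list_py : Prop := ∀ (value : Option (List String)), Dom_format_payload_list_py value → Spec_format_payload_list_py value (format_payload_list_py value)

-- ===== LEMMAS AND PROOFS =====

-- the reverse foldl, written as structural recursion (proof helper)
def fpl_joined : List String → String
  | [] => ""
  | x :: t => fpl_step (fpl_joined t) x

lemma fpl_foldl_reverse (xs : List String) :
    xs.reverse.foldl fpl_step "" = fpl_joined xs := by
  rw [List.foldl_reverse]
  induction xs with
  | nil => rfl
  | cons x t ih => simp [fpl_joined, ih]

lemma fpl_sjoin_singleton (a : String) : PySem.Str.join ", " [a] = a := by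
  apply String.toList_inj.mp
  rw [PySem.Str.toList_join]
  simp [PySem.Chars.join_singleton]

lemma fpl_sjoin_cons₂ (a b : String) (t : List String) :
    PySem.Str.join ", " (a :: b :: t) = a ++ ", " ++ PySem.Str.join ", " (b :: t) := by
  apply String.toList_inj.mp
  rw [PySem.Str.toList_join]
  simp only [List.map_cons, PySem.Chars.join_cons_cons, String.toList_append,
    PySem.Str.toList_join]

lemma fpl_sjoin_ne (a : String) (t : List String) (ha : a ≠ "") :
    PySem.Str.join ", " (a :: t) ≠ "" := by
  intro h
  have h' := congrArg String.toList h
  cases t with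
  | nil =>
    rw [PySem.Str.toList_join] at h'
    simp [PySem.Chars.join_singleton] at h'
    exact ha (String.toList_inj.mp (by simp [h']))
  | cons c t =>
    rw [PySem.Str.toList_join] at h'
    simp [PySem.Chars.join_cons_cons] at h'

-- the recursion computes ", ".join of the stripped nonempty items (or "" if none)
lemma fpl_joined_eq (xs : List String) :
    fpl_joined xs =
      (match (xs.map (fun item => PySem.Str.strip item)).filter (fun s => s != "") with
       | [] => ""
       | a :: t => PySem.Str.join ", " (a :: t)) := by
  induction xs with
  | nil => simp [fpl_joined]
  | cons x xs ih =>
    by_cases hs : PySem.Str.strip x = ""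
    · simpa [fpl_joined, fpl_step, hs] using ih
    · have hb : (PySem.Str.strip x == "") = false := by simpa using hs
      have hb' : (PySem.Str.strip x != "") = true := by simp [bne, hb]
      simp only [fpl_joined, fpl_step, List.map_cons, List.filter_cons, hb, hb', if_true,
        Bool.false_eq_true, if_false, ih]
      cases hk : (xs.map (fun item => PySem.Str.strip item)).filter (fun s => s != "") with
      | nil => simp [fpl_sjoin_singleton]
      | cons a t =>
        have ha : a ≠ "" := by
          have hmem : a ∈ (xs.map (fun item => PySem.Str.strip item)).filter (fun s => s != "") := by
            rw [hk]; exact List.mem_cons_self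
          simpa using List.of_mem_filter hmem
        have ht : (PySem.Str.join ", " (a :: t) == "") = false := by
          simpa using fpl_sjoin_ne a t ha
        simp [ht, fpl_sjoin_cons₂]

-- ===== VERDICT =====
theorem format_payload_list_py_spec : Claim_equal_format_payload_list_py := by
  intro value _
  unfold Spec_format_payload_list_py format_payload_list_py format_payload_list_py_alt
  cases value with
  | none => rfl
  | some xs =>
    simp only [fpl_foldl_reverse xs, fpl_joined_eq xs]
    cases hat : (xs.map (fun item => PySem.Str.strip item)).filter (fun s => s != "") with
    | nil => simp
    | cons a t =>
      have ha : a ≠ "" := by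
        have hmem : a ∈ (xs.map (fun item => PySem.Str.strip item)).filter (fun s => s != "") := by
          rw [hat]; exact List.mem_cons_self
        simpa using List.of_mem_filter hmem
      have hjne := fpl_sjoin_ne a t ha
      simp [hjne]
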